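-- pv_equiv track=rewrite | github.com/JesseAnnear/COVID_RNA | COVID.py | flatten_matrix
-- ===== SOURCE A (Python) =====
-- def flatten_matrix(matrix):
--     """Function to flatten the matrix """
--     num_rows = len(matrix)
--     num_cols = len(matrix[0])
--     flattened = [0] * (num_rows * num_cols)
--     for j in range(num_cols):
--         for i in range(num_rows):
--             flattened[i * num_cols + j] = matrix[i][j]
--     return flattened
-- ===== SOURCE B (Python) =====
-- def flatten_matrix(matrix):
--     """Flatten the matrix row by row (row-major), truncating rows to the width of row 0."""
--     num_cols = len(matrix[0])
--     flattened = []
--     for row in matrix: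
--         flattened.extend(row[:num_cols])
--     return flattened
-- ===== Notes on version B (the rewrite author's own statement) =====
-- stated objective: idiomatic
-- what changed: Replaces A's column-major indexed writes into a preallocated [0]*(n*m) buffer by a natural row-by-row traversal that extends a growing list with each row truncated to num_cols, removing all index arithmetic.
import Mathlib
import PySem

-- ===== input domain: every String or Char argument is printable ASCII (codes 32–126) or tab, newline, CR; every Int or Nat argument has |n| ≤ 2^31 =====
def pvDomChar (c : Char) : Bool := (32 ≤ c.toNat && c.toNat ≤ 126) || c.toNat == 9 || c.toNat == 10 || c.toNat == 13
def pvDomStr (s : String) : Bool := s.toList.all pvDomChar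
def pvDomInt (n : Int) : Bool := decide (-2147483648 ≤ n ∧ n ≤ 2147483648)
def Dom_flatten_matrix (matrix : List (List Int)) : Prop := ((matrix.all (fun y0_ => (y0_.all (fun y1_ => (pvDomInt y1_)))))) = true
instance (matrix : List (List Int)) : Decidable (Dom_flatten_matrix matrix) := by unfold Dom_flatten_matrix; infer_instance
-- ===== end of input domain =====

-- B replaces A's column-major indexed writes into a preallocated buffer by a row-by-row
-- traversal that appends each row truncated to num_cols (idiomatic; same cost).
-- Return-value equivalence only; neither version mutates its argument.

-- ===== PORT A =====
-- Literal port of A: num_cols from matrix[0] (IndexError on empty matrix → outside Pre_),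
-- [0]*(n*m) buffer, column-major nested loops writing matrix[i][j] at i*num_cols+j.
-- Reads use getD defaults; they are exact on Pre_, where every access is in range.
def flatten_matrix (matrix : List (List Int)) : List Int :=
  let num_rows := matrix.length
  let num_cols := ((PySem.List.pyGet? matrix 0).getD []).length
  let flattened := List.replicate (num_rows * num_cols) (0 : Int)
  (List.range num_cols).foldl (fun fl j =>
    (List.range num_rows).foldl (fun fl2 i =>
      fl2.set (i * num_cols + j) ((matrix.getD i []).getD j 0)) fl) flattened

-- ===== PORT B =====
def flatten_matrix_alt (matrix : List (List Int)) : List Int :=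
  let num_cols := ((PySem.List.pyGet? matrix 0).getD []).length
  matrix.foldl (fun acc row => acc ++ PySem.List.slice row (some 0) (some (num_cols : Int))) []

-- ===== PRECONDITION & SPEC =====
-- Pre_ excludes exactly the inputs where the Python A raises IndexError: the empty matrix
-- (matrix[0]) and matrices with a row shorter than row 0 (reading matrix[i][j]).
def Pre_flatten_matrix (matrix : List (List Int)) : Prop :=
  matrix ≠ [] ∧ ∀ row ∈ matrix, (matrix.headD []).length ≤ row.length
instance (matrix : List (List Int)) : Decidable (Pre_flatten_matrix matrix) := by
  unfold Pre_flatten_matrix; infer_instance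
def pvWitness_flatten_matrix : List (List Int) := [[1, 2], [3, 4, 5]]

-- (On a nonempty matrix containing a row shorter than row 0, A raises IndexError while
-- B's Python returns the rows truncated to len(matrix[0]); those inputs lie outside Pre_.)

def Spec_flatten_matrix (matrix : List (List Int)) (out : List Int) : Prop := out = flatten_matrix_alt matrix
instance (matrix : List (List Int)) (out : List Int) : Decidable (Spec_flatten_matrix matrix out) := by unfold Spec_flatten_matrix; infer_instance

-- ===== CLAIM (what is proved, stated in full; the proofs are below) =====
def Claim_equal_flatten_matrix : Prop := ∀ (matrix : List (List Int)), Dom_flatten_matrix matrix → Pre_flatten_matrix matrix → Spec_flatten_matrix matrix (flatten_matrix matrix)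

-- ===== LEMMAS AND PROOFS =====

theorem idx_lt {i j n m : Nat} (hi : i < n) (hj : j < m) : i * m + j < n * m :=
  calc i * m + j < i * m + m := by omega
    _ = (i + 1) * m := by ring
    _ ≤ n * m := Nat.mul_le_mul_right m (by omega)

-- The inner loop (one column j): lengths and entries.
theorem inner_length (m j : Nat) (v : Nat → Int) (l : List Int) (N : Nat) :
    ((List.range N).foldl (fun fl2 i => fl2.set (i * m + j) (v i)) l).length = l.length := by
  induction N generalizing l with
  | zero => simp
  | succ n ih => rw [List.range_succ, List.foldl_append]; simp [ih]

theorem inner_get (m j : Nat) (hj : j < m) (v : Nat → Int) (N : Nat) (l : List Int)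
    (hlen : ∀ i, i < N → i * m + j < l.length) (k : Nat) :
    ((List.range N).foldl (fun fl2 i => fl2.set (i * m + j) (v i)) l)[k]? =
      if k % m = j ∧ k / m < N then some (v (k / m)) else l[k]? := by
  induction N generalizing l with
  | zero => simp
  | succ n ih =>
    rw [List.range_succ, List.foldl_append]
    simp only [List.foldl_cons, List.foldl_nil]
    rw [List.getElem?_set]
    have h1 : (n * m + j) % m = j := by
      rw [Nat.mul_comm, Nat.mul_add_mod, Nat.mod_eq_of_lt hj]
    have h2 : (n * m + j) / m = n := by
      rw [Nat.mul_comm, Nat.mul_add_div (by omega), Nat.div_eq_of_lt hj]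
      omega
    by_cases hk : n * m + j = k
    · subst hk
      rw [if_pos rfl, inner_length, if_pos (hlen n (Nat.lt_succ_self n))]
      rw [if_pos ⟨h1, by omega⟩, h2]
    · rw [if_neg hk, ih l (fun i hi => hlen i (by omega))]
      have : (k % m = j ∧ k / m < n) ↔ (k % m = j ∧ k / m < n + 1) := by
        constructor
        · rintro ⟨a, b⟩; exact ⟨a, by omega⟩
        · rintro ⟨a, b⟩
          refine ⟨a, ?_⟩
          rcases Nat.lt_or_ge (k / m) n with h | h
          · exact h
          · exfalso; apply hk
            have hdn : k / m = n := by omega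
            have hdm := Nat.div_add_mod k m
            rw [hdn, a] at hdm; rw [Nat.mul_comm] at hdm; omega
      rw [if_congr this rfl rfl]

theorem outer_length (m : Nat) (v : Nat → Nat → Int) (N : Nat) (l : List Int) (J : Nat) :
    ((List.range J).foldl (fun fl j =>
      (List.range N).foldl (fun fl2 i => fl2.set (i * m + j) (v i j)) fl) l).length = l.length := by
  induction J generalizing l with
  | zero => simp
  | succ n ih => rw [List.range_succ, List.foldl_append]; simp [inner_length, ih]

-- The full nested loop over a prefix of columns J ≤ m.
theorem outer_get (m : Nat) (v : Nat → Nat → Int) (N : Nat) (l : List Int) (J : Nat) (hJ : J ≤ m)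
    (hlen : ∀ i j, i < N → j < m → i * m + j < l.length) (k : Nat) :
    ((List.range J).foldl (fun fl j =>
      (List.range N).foldl (fun fl2 i => fl2.set (i * m + j) (v i j)) fl) l)[k]? =
      if k % m < J ∧ k / m < N then some (v (k / m) (k % m)) else l[k]? := by
  induction J generalizing l with
  | zero => simp
  | succ n ih =>
    rw [List.range_succ, List.foldl_append]
    simp only [List.foldl_cons, List.foldl_nil]
    rw [inner_get m n (by omega) _ N _
      (fun i hi => by rw [outer_length]; exact hlen i n hi (by omega)) k]
    rw [ih l (by omega) hlen]
    by_cases h1 : k % m = n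
    · by_cases h2 : k / m < N
      · rw [if_pos ⟨h1, h2⟩, if_pos ⟨by omega, h2⟩, h1]
      · rw [if_neg (fun h => h2 h.2), if_neg (fun h => h2 h.2), if_neg (fun h => h2 h.2)]
    · rw [if_neg (fun h => h1 h.1)]
      have : (k % m < n ∧ k / m < N) ↔ (k % m < n + 1 ∧ k / m < N) := by
        constructor
        · rintro ⟨a, b⟩; exact ⟨by omega, b⟩
        · rintro ⟨a, b⟩; exact ⟨by omega, b⟩
      rw [if_congr this rfl rfl]

-- B equals the flatMap of rows truncated to m.
theorem alt_eq_flatMap (matrix : List (List Int)) (m : Nat)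
    (hm : ((PySem.List.pyGet? matrix 0).getD []).length = m) :
    flatten_matrix_alt matrix = matrix.flatMap (fun row => row.take m) := by
  unfold flatten_matrix_alt
  simp only [hm]
  rw [PySem.List.foldl_append_eq_flatMap]
  simp only [List.nil_append]
  congr 1
  funext row
  rw [PySem.List.slice_zero_start, PySem.List.slice_to_natCast]

-- Entries of the flatMap of uniformly-long truncated rows.
theorem flatMap_take_length (rows : List (List Int)) (m : Nat)
    (h : ∀ row ∈ rows, m ≤ row.length) :
    (rows.flatMap (fun row => row.take m)).length = rows.length * m := by
  induction rows with
  | nil => simp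
  | cons r rest ih =>
    simp only [List.flatMap_cons, List.length_append, List.length_take]
    rw [ih (fun row hr => h row (List.mem_cons_of_mem _ hr))]
    have := h r (List.mem_cons_self)
    simp [Nat.min_eq_left this]; ring

theorem flatMap_take_get (rows : List (List Int)) (m : Nat)
    (h : ∀ row ∈ rows, m ≤ row.length) (k : Nat) (hk : k < rows.length * m) :
    (rows.flatMap (fun row => row.take m))[k]? = some ((rows.getD (k / m) []).getD (k % m) 0) := by
  induction rows generalizing k with
  | nil => simp at hk
  | cons r rest ih =>
    have hr : m ≤ r.length := h r List.mem_cons_self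
    have hm : 0 < m := by
      rcases Nat.eq_zero_or_pos m with h0 | h0
      · rw [h0] at hk; simp at hk
      · exact h0
    have hlen : (r.take m).length = m := by simp [Nat.min_eq_left hr]
    simp only [List.flatMap_cons]
    by_cases hkm : k < m
    · rw [List.getElem?_append_left (by rw [hlen]; omega)]
      have hdiv : k / m = 0 := Nat.div_eq_of_lt hkm
      have hmod : k % m = k := Nat.mod_eq_of_lt hkm
      rw [hdiv, hmod]
      simp only [List.getD_cons_zero]
      rw [List.getElem?_take_of_lt hkm, List.getElem?_eq_getElem (by omega)]
      rw [List.getD_eq_getElem r 0 (by omega)]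
    · rw [List.getElem?_append_right (by rw [hlen]; omega), hlen]
      have hrec : k - m < rest.length * m := by
        have hexp : (rest.length + 1) * m = rest.length * m + m := by ring
        simp only [List.length_cons] at hk
        omega
      rw [ih (fun row hrr => h row (List.mem_cons_of_mem _ hrr)) (k - m) hrec]
      have hdiv : k / m = (k - m) / m + 1 := Nat.div_eq_sub_div hm (by omega)
      have hmod : k % m = (k - m) % m := Nat.mod_eq_sub_mod (by omega)
      rw [hdiv, hmod, List.getD_cons_succ]

-- ===== VERDICT (by name: the statement is the Claim_ definition above) =====
theorem flatten_matrix_spec : Claim_equal_flatten_matrix := by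
  intro matrix _ hpre
  obtain ⟨hne, hrows⟩ := hpre
  unfold Spec_flatten_matrix
  obtain ⟨r0, rest, rfl⟩ : ∃ r0 rest, matrix = r0 :: rest :=
    ⟨matrix.headD [], matrix.tail, by cases matrix with | nil => exact absurd rfl hne | cons a l => rfl⟩
  have hhead : ((PySem.List.pyGet? (r0 :: rest) 0).getD []).length = r0.length := by
    rw [PySem.List.pyGet?_zero_cons]; rfl
  have hrows' : ∀ row ∈ r0 :: rest, r0.length ≤ row.length := by
    intro row hr; simpa using hrows row hr
  rw [alt_eq_flatMap _ r0.length hhead]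
  unfold flatten_matrix
  simp only [hhead]
  apply List.ext_getElem?
  intro k
  rw [outer_get r0.length _ _ _ r0.length (le_refl _)
    (fun i j hi hj => by rw [List.length_replicate]; exact idx_lt hi hj) k]
  by_cases hk : k < (r0 :: rest).length * r0.length
  · have hm0 : 0 < r0.length := by
      rcases Nat.eq_zero_or_pos r0.length with h0 | h0
      · rw [h0] at hk; simp at hk
      · exact h0
    rw [flatMap_take_get _ r0.length hrows' k hk]
    rw [if_pos ⟨Nat.mod_lt _ hm0, (Nat.div_lt_iff_lt_mul hm0).mpr (by omega)⟩]
  · have h1 : ((r0 :: rest).flatMap (fun row => row.take r0.length))[k]? = none := by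
      rw [List.getElem?_eq_none_iff, flatMap_take_length _ r0.length hrows']; omega
    rw [h1, if_neg, List.getElem?_eq_none_iff]
    · simp only [List.length_replicate]; omega
    · rintro ⟨c1, c2⟩
      exact hk ((Nat.div_lt_iff_lt_mul (by omega)).mp c2)
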